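-- pv_equiv track=rewrite | github.com/Buffalo2391/326 | et10/redgreenrec.py | nearfactors
-- ===== SOURCE A (Python) =====
-- import math
--
-- def nearfactors(value):
--     kvalues = {1}
--     x = 2
--     i = math.floor(value/x)
--     while i > 1:
--         k = math.floor(value/i)
--         kvalues.add(k)
--         x = k+1
--         i = math.floor(value/x)
--     return kvalues
-- ===== SOURCE B (Python) =====
-- import math
--
-- def nearfactors(value):
--     # sqrt-split enumeration: every quotient floor(value/x) (x >= 2) is either
--     # a small value q in [2, isqrt(value)] or value // x for some x in [2, isqrt(value)].
--     kvalues = {1}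
--     if value >= 0:
--         s = math.isqrt(value)
--         for q in range(2, s + 1):
--             kvalues.add(q)
--         for x in range(s, 1, -1):
--             kvalues.add(value // x)
--     return kvalues
-- ===== Notes on version B (the rewrite author's own statement) =====
-- stated objective: alternative
-- what changed: Replaces A's quotient-jumping while-loop (x jumps to floor(value/floor(value/x))+1 each iteration) by the closed-form sqrt-split enumeration: every distinct quotient floor(value/x) for x>=2 is either a small value q in [2, isqrt(value)] or value//x for x in [2, isqrt(value)], so B just runs two bounded for-loops over range objects.
import Mathlib
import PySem

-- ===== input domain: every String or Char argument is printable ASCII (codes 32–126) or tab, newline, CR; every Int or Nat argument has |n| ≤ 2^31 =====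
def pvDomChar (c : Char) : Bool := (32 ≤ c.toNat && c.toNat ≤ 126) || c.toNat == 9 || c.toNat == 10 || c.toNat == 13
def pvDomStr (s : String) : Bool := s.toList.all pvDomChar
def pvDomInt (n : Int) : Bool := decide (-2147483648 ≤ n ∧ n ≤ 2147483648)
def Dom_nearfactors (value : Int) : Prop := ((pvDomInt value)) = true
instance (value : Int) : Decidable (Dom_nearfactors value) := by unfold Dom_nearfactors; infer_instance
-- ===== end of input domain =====

-- B replaces A's quotient-jumping while-loop by a closed-form sqrt-split enumeration of the
-- same distinct quotients (two bounded for-loops); objective: alternative algorithm, same cost.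
-- (Python's value/x is float division; for |value| ≤ 2^31 its floor equals exact floor division,
-- which is what the port uses.)

-- ===== PORT A =====
-- while loop of A: x jumps block to block; fuel bounds the iteration count (x strictly increases
-- and stays ≤ value while the guard holds, so value.toNat + 2 iterations never run out).
def nearLoopA (value : Int) (fuel : Nat) (x : Int) (acc : List Int) : List Int :=
  match fuel with
  | 0 => acc
  | fuel + 1 =>
    let i := PySem.Int.floordiv value x
    if 1 < i then
      let k := PySem.Int.floordiv value i
      nearLoopA value fuel (k + 1) (PySem.Set.add acc k)
    else acc

def nearfactors (value : Int) : List Int :=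
  nearLoopA value (value.toNat + 2) 2 (PySem.Set.ofList [1])

-- ===== PORT B =====
def nearfactors_alt (value : Int) : List Int :=
  let kvalues : PySem.Set Int := PySem.Set.ofList [1]
  if 0 ≤ value then
    let s : Nat := Nat.sqrt value.toNat          -- math.isqrt(value)
    let kvalues := (PySem.List.pyRange 2 ((s : Int) + 1) 1).foldl
      (fun acc q => PySem.Set.add acc q) kvalues
    (PySem.List.pyRange (s : Int) 1 (-1)).foldl
      (fun acc x => PySem.Set.add acc (PySem.Int.floordiv value x)) kvalues
  else kvalues

-- ===== PRECONDITION & SPEC =====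
def Spec_nearfactors (value : Int) (out : List Int) : Prop := out = nearfactors_alt value
instance (value : Int) (out : List Int) : Decidable (Spec_nearfactors value out) := by unfold Spec_nearfactors; infer_instance

-- ===== CLAIM (what is proved, stated in full; the proofs are below) =====
def Claim_equal_nearfactors : Prop := ∀ (value : Int), Dom_nearfactors value → Spec_nearfactors value (nearfactors value)

-- ===== LEMMAS AND PROOFS =====

-- Nat-level models of the two loops (proof helpers only).
def natAdd (acc : List Nat) (m : Nat) : List Nat := if m ∈ acc then acc else acc ++ [m]

def natLoopA (n : Nat) (fuel : Nat) (x : Nat) (acc : List Nat) : List Nat :=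
  match fuel with
  | 0 => acc
  | fuel + 1 =>
    if 1 < n / x then
      natLoopA n fuel (n / (n / x) + 1) (natAdd acc (n / (n / x)))
    else acc

def natA (n : Nat) : List Nat := natLoopA n (n + 2) 2 [1]

def natB (n : Nat) : List Nat :=
  let s := Nat.sqrt n
  let acc := (List.range' 2 (s - 1)).foldl natAdd [1]
  ((List.range' 2 (s - 1)).reverse).foldl (fun a x => natAdd a (n / x)) acc

def pvCast (l : List Nat) : List Int := l.map (fun m : Nat => (m : Int))

-- arithmetic toolkit
lemma quot_id (n m x : Nat) (hx : 1 ≤ x) (hm1 : 1 ≤ m) (hmx : m = n / x) :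
    n / (n / m) = m := by
  have h1 : x * m ≤ n := by rw [hmx]; exact Nat.mul_div_le n x
  have h2 : n < (m + 1) * x := by
    rw [← Nat.div_lt_iff_lt_mul hx, ← hmx]; omega
  have hq1 : x ≤ n / m := (Nat.le_div_iff_mul_le hm1).2 (by nlinarith)
  have hq2 : (n / m) * m ≤ n := Nat.div_mul_le_self n m
  have hle : m ≤ n / (n / m) := (Nat.le_div_iff_mul_le (by omega)).2 (by nlinarith)
  have hlt : n / (n / m) < m + 1 := by
    rw [Nat.div_lt_iff_lt_mul (by omega : 0 < n / m)]
    calc n < (m + 1) * x := h2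
    _ ≤ (m + 1) * (n / m) := by exact Nat.mul_le_mul_left _ hq1
  omega

lemma pv_small_quot (n q : Nat) (h2 : 2 ≤ q) (hq : q ≤ Nat.sqrt n) :
    Nat.sqrt n ≤ n / q ∧ n / (n / q) = q := by
  have hs : Nat.sqrt n * Nat.sqrt n ≤ n := by have := Nat.sqrt_le' n; nlinarith
  have hsq : Nat.sqrt n ≤ n / q := by
    refine (Nat.le_div_iff_mul_le (by omega)).2 ?_
    calc Nat.sqrt n * q ≤ Nat.sqrt n * Nat.sqrt n := Nat.mul_le_mul_left _ hq
    _ ≤ n := hs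
  refine ⟨hsq, ?_⟩
  -- x := n / q ; n = q * x + r, r < q ≤ sqrt n ≤ x
  have hx1 : q * (n / q) ≤ n := Nat.mul_div_le n q
  have hr : n < (q + 1) * (n / q) := by
    have hrlt : n % q < q := Nat.mod_lt _ (by omega)
    have : n = q * (n / q) + n % q := (Nat.div_add_mod n q).symm ▸ by omega
    nlinarith [hq.trans hsq]
  have ha : q ≤ n / (n / q) := (Nat.le_div_iff_mul_le (by omega)).2 (by nlinarith)
  have hb : n / (n / q) < q + 1 := by
    rw [Nat.div_lt_iff_lt_mul (by omega : 0 < n / q)]; exact hr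
  omega

lemma natLoopA_inv (n : Nat) : ∀ (fuel x : Nat) (acc : List Nat),
    2 ≤ x → n + 2 ≤ fuel + x →
    List.Pairwise (· < ·) acc → (∀ m ∈ acc, m < x) →
    (∀ m, m ∈ acc ↔ m = 1 ∨ (2 ≤ m ∧ m < x ∧ 2 ≤ n / m ∧ n / (n / m) = m)) →
    List.Pairwise (· < ·) (natLoopA n fuel x acc) ∧
    (∀ m, m ∈ natLoopA n fuel x acc ↔ m = 1 ∨ (2 ≤ m ∧ 2 ≤ n / m ∧ n / (n / m) = m)) := by
  intro fuel
  induction fuel with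
  | zero =>
    intro x acc hx hfuel hs hlt hmem
    have hguard : ¬ 1 < n / x := by
      intro hg
      have : 2 * x ≤ n := by
        have := (Nat.le_div_iff_mul_le (by omega : 0 < x)).1 (by omega : 2 ≤ n / x)
        omega
      omega
    -- exit characterization
    refine ⟨by simpa [natLoopA] using hs, ?_⟩
    intro m
    simp only [natLoopA]
    rw [hmem m]
    constructor
    · rintro (h | ⟨h1, _, h3, h4⟩); · left; exact h
      · exact Or.inr ⟨h1, h3, h4⟩
    · rintro (h | ⟨h1, h3, h4⟩); · left; exact h
      · refine Or.inr ⟨h1, ?_, h3, h4⟩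
        -- m ≤ n/2 < x
        have hm2 : m ≤ n / 2 := by
          rw [← h4]
          exact Nat.div_le_div_left h3 (by omega)
        have : n / 2 < x := by
          rw [Nat.div_lt_iff_lt_mul (by omega : 0 < 2)]
          have : n / x < 2 := by omega
          have := (Nat.div_lt_iff_lt_mul (by omega : 0 < x)).1 this
          omega
        omega
  | succ fuel ih =>
    intro x acc hx hfuel hs hlt hmem
    by_cases hguard : 1 < n / x
    · simp only [natLoopA, if_pos hguard]
      set i := n / x with hi
      set k := n / i with hk
      have hxk : x ≤ k := by
        refine (Nat.le_div_iff_mul_le (by omega : 0 < i)).2 ?_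
        rw [hi]; have := Nat.mul_div_le n x; omega
      have hki : n / k = i := quot_id n i x (by omega) (by omega) hi
      have hkk : n / (n / k) = k := by rw [hki]
      have hknot : k ∉ acc := fun hmm => by have := hlt k hmm; omega
      have hadd : natAdd acc k = acc ++ [k] := by simp [natAdd, hknot]
      rw [hadd]
      apply ih (k+1) (acc ++ [k]) (by omega) (by omega)
      · exact List.pairwise_append.2 ⟨hs, List.pairwise_singleton _ _,
          fun a ha b hb => by simp at hb; subst hb; have := hlt a ha; omega⟩
      · intro m hm
        rcases List.mem_append.1 hm with h | h
        · have := hlt m h; omega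
        · simp at h; omega
      · intro m
        rw [List.mem_append, hmem m]
        constructor
        · rintro ((h | ⟨h1, h2, h3, h4⟩) | h)
          · left; exact h
          · exact Or.inr ⟨h1, by omega, h3, h4⟩
          · simp at h; subst h
            exact Or.inr ⟨by omega, by omega, by rw [hki]; omega, hkk⟩
        · rintro (h | ⟨h1, h2, h3, h4⟩)
          · left; exact Or.inl h
          · by_cases hmx : m < x
            · exact Or.inl (Or.inr ⟨h1, hmx, h3, h4⟩)
            · -- x ≤ m ≤ k, so n/m = i and m = n/(n/m) = n/i = k
              right; simp
              rw [Nat.not_lt] at hmx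
              have hmk : m ≤ k := by omega
              have h5 : n / m ≤ i := by rw [hi]; exact Nat.div_le_div_left hmx (by omega)
              have h6 : i ≤ n / m := by rw [← hki]; exact Nat.div_le_div_left hmk (by omega)
              have : n / m = i := by omega
              rw [this] at h4; omega
    · simp only [natLoopA, if_neg hguard]
      refine ⟨hs, ?_⟩
      intro m
      rw [hmem m]
      constructor
      · rintro (h | ⟨h1, _, h3, h4⟩); · left; exact h
        · exact Or.inr ⟨h1, h3, h4⟩
      · rintro (h | ⟨h1, h3, h4⟩); · left; exact h
        · refine Or.inr ⟨h1, ?_, h3, h4⟩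
          have hm2 : m ≤ n / 2 := by
            rw [← h4]; exact Nat.div_le_div_left h3 (by omega)
          have : n / 2 < x := by
            rw [Nat.div_lt_iff_lt_mul (by omega : 0 < 2)]
            have h7 : n / x < 2 := by omega
            have := (Nat.div_lt_iff_lt_mul (by omega : 0 < x)).1 h7
            omega
          omega

lemma natA_char (n : Nat) :
    List.Pairwise (· < ·) (natA n) ∧
    (∀ m, m ∈ natA n ↔ m = 1 ∨ (2 ≤ m ∧ 2 ≤ n / m ∧ n / (n / m) = m)) := by
  apply natLoopA_inv n (n + 2) 2 [1] (by omega) (by omega)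
  · exact List.pairwise_singleton _ _
  · intro m hm; simp at hm; omega
  · intro m; simp; omega

lemma mem_foldl_natAdd : ∀ (ys acc : List Nat) (m : Nat),
    m ∈ ys.foldl natAdd acc ↔ m ∈ acc ∨ m ∈ ys := by
  intro ys
  induction ys with
  | nil => simp
  | cons y ys ih =>
    intro acc m
    simp only [List.foldl_cons, ih, natAdd]
    split_ifs with h
    · simp only [List.mem_cons]
      constructor
      · rintro (h1 | h1); · exact Or.inl h1
        · exact Or.inr (Or.inr h1)
      · rintro (h1 | h1 | h1)
        · exact Or.inl h1
        · exact Or.inl (h1 ▸ h)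
        · exact Or.inr h1
    · simp [List.mem_append]
      tauto

lemma sorted_foldl_natAdd : ∀ (ys acc : List Nat),
    List.Pairwise (· < ·) acc → List.Pairwise (· ≤ ·) ys →
    (∀ a ∈ acc, ∀ b ∈ ys, a ≤ b) →
    List.Pairwise (· < ·) (ys.foldl natAdd acc) := by
  intro ys
  induction ys with
  | nil => intro acc h _ _; simpa using h
  | cons y ys ih =>
    intro acc hacc hys hle
    simp only [List.foldl_cons]
    have hy_le : ∀ b ∈ ys, y ≤ b := fun b hb => (List.pairwise_cons.1 hys).1 b hb
    have hys' := (List.pairwise_cons.1 hys).2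
    by_cases h : y ∈ acc
    · rw [natAdd, if_pos h]
      exact ih acc hacc hys' (fun a ha b hb => hle a ha b (List.mem_cons_of_mem _ hb))
    · rw [natAdd, if_neg h]
      apply ih
      · exact List.pairwise_append.2 ⟨hacc, List.pairwise_singleton _ _,
          fun a ha b2 hb => by
            simp at hb
            rw [hb]
            have hay : a ≤ y := hle a ha y (by simp)
            rcases Nat.lt_or_ge a y with h1 | h1; · exact h1
            · have hay2 : a = y := by omega
              exact absurd (hay2 ▸ ha) h⟩
      · exact hys'
      · intro a ha b hb
        rcases List.mem_append.1 ha with h1 | h1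
        · exact hle a h1 b (List.mem_cons_of_mem _ hb)
        · simp at h1; subst h1; exact hy_le b hb

lemma natB_char (n : Nat) :
    List.Pairwise (· < ·) (natB n) ∧
    (∀ m, m ∈ natB n ↔ m = 1 ∨ (2 ≤ m ∧ m ≤ Nat.sqrt n) ∨
      (∃ x, 2 ≤ x ∧ x ≤ Nat.sqrt n ∧ m = n / x)) := by
  set s := Nat.sqrt n with hs
  have hmem_r : ∀ m : Nat, m ∈ List.range' 2 (s - 1) ↔ 2 ≤ m ∧ m ≤ s := by
    intro m
    rw [List.mem_range']
    constructor
    · rintro ⟨i, hi, rfl⟩; omega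
    · rintro ⟨h1, h2⟩; exact ⟨m - 2, by omega, by omega⟩
  -- first fold
  have hacc1_mem : ∀ m, m ∈ (List.range' 2 (s - 1)).foldl natAdd [1] ↔
      m = 1 ∨ (2 ≤ m ∧ m ≤ s) := by
    intro m
    rw [mem_foldl_natAdd, hmem_r]; simp
  have hr_sorted : List.Pairwise (· ≤ ·) (List.range' 2 (s - 1)) :=
    (List.pairwise_lt_range' ..).imp Nat.le_of_lt
  have hacc1_sorted : List.Pairwise (· < ·) ((List.range' 2 (s - 1)).foldl natAdd [1]) := by
    apply sorted_foldl_natAdd _ _ (List.pairwise_singleton _ _) hr_sorted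
    intro a ha b hb
    simp at ha; subst ha
    exact Nat.one_le_iff_ne_zero.2 (by have := (hmem_r b).1 hb; omega)
  set acc1 := (List.range' 2 (s - 1)).foldl natAdd [1] with hacc1
  -- second fold: rewrite as fold of natAdd over mapped list
  have hfold2 : ((List.range' 2 (s - 1)).reverse).foldl (fun a x => natAdd a (n / x)) acc1 =
      (((List.range' 2 (s - 1)).reverse).map (fun x => n / x)).foldl natAdd acc1 := by
    rw [List.foldl_map]
  have hmem_r2 : ∀ v : Nat, v ∈ ((List.range' 2 (s - 1)).reverse).map (fun x => n / x) ↔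
      ∃ x, 2 ≤ x ∧ x ≤ s ∧ v = n / x := by
    intro v
    simp only [List.mem_map, List.mem_reverse]
    constructor
    · rintro ⟨x, hx, rfl⟩; have := (hmem_r x).1 hx; exact ⟨x, this.1, this.2, rfl⟩
    · rintro ⟨x, h1, h2, rfl⟩; exact ⟨x, (hmem_r x).2 ⟨h1, h2⟩, rfl⟩
  have hB : natB n = (((List.range' 2 (s - 1)).reverse).map (fun x => n / x)).foldl natAdd acc1 := by
    rw [natB]; rw [← hfold2]
  constructor
  · rw [hB]
    apply sorted_foldl_natAdd _ _ hacc1_sorted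
    · -- mapped reversed range is ≤-sorted (quotients antitone)
      rw [List.pairwise_map, List.pairwise_reverse]
      apply (List.pairwise_lt_range' ..).imp_of_mem
      intro a b ha hb hab
      exact Nat.div_le_div_left (Nat.le_of_lt hab) (by have := (hmem_r a).1 ha; omega)
    · intro a ha b hb
      obtain ⟨x, hx1, hx2, rfl⟩ := (hmem_r2 b).1 hb
      have hsx : s ≤ n / x := (pv_small_quot n x hx1 (hs ▸ hx2)).1
      have : a ≤ s := by rcases (hacc1_mem a).1 ha with h | h; · omega
                         · omega
      omega
  · intro m
    rw [hB, mem_foldl_natAdd, hacc1_mem, hmem_r2]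
    tauto

lemma char_iff (n m : Nat) :
    (m = 1 ∨ (2 ≤ m ∧ 2 ≤ n / m ∧ n / (n / m) = m)) ↔
    (m = 1 ∨ (2 ≤ m ∧ m ≤ Nat.sqrt n) ∨ (∃ x, 2 ≤ x ∧ x ≤ Nat.sqrt n ∧ m = n / x)) := by
  set s := Nat.sqrt n with hs
  constructor
  · rintro (h | ⟨h1, h2, h3⟩); · exact Or.inl h
    rcases Nat.lt_or_ge s m with hms | hms'
    · refine Or.inr (Or.inr ⟨n / m, h2, ?_, h3.symm⟩)
      have ha : n / m ≤ n / (s + 1) := Nat.div_le_div_left (by omega) (by omega)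
      have hb : n / (s + 1) < s + 1 := by
        rw [Nat.div_lt_iff_lt_mul (by omega)]
        have := Nat.lt_succ_sqrt' n
        nlinarith
      omega
    · exact Or.inr (Or.inl ⟨h1, hms'⟩)
  · rintro (h | ⟨h1, h2⟩ | ⟨x, hx1, hx2, rfl⟩); · exact Or.inl h
    · obtain ⟨ha, hb⟩ := pv_small_quot n m h1 (hs ▸ h2)
      exact Or.inr ⟨h1, by omega, hb⟩
    · have hs2 : 2 ≤ s := by omega
      obtain ⟨hss, _⟩ := pv_small_quot n s hs2 (le_refl _)
      have hm1 : n / s ≤ n / x := Nat.div_le_div_left hx2 (by omega)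
      have hm2 : 2 ≤ n / x := by omega
      have hhalf : n / x ≤ n / 2 := Nat.div_le_div_left hx1 (by omega)
      have h2n : 2 * (n / 2) ≤ n := by have := Nat.mul_div_le n 2; omega
      refine Or.inr ⟨hm2, ?_, quot_id n (n / x) x (by omega) (by omega) rfl⟩
      exact (Nat.le_div_iff_mul_le (by omega)).2 (by omega)

lemma natA_eq_natB (n : Nat) : natA n = natB n := by
  obtain ⟨sA, mA⟩ := natA_char n
  obtain ⟨sB, mB⟩ := natB_char n
  have h : ∀ m, m ∈ natA n ↔ m ∈ natB n := by
    intro m; rw [mA, mB]; exact char_iff n m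
  have nA : (natA n).Nodup := sA.imp (fun h => Nat.ne_of_lt h)
  have nB : (natB n).Nodup := sB.imp (fun h => Nat.ne_of_lt h)
  exact ((List.perm_ext_iff_of_nodup nA nB).2 h).eq_of_pairwise
    (fun a b _ _ h1 h2 => Nat.le_antisymm (Nat.le_of_lt h1) (Nat.le_of_lt h2)) sA sB

-- bridges
lemma bridge_add (acc : List Nat) (k : Nat) :
    PySem.Set.add (pvCast acc) ((k : Nat) : Int) = pvCast (natAdd acc k) := by
  rw [PySem.Set.add_eq_ite, natAdd]
  have hmm : (((k : Nat) : Int) ∈ pvCast acc) ↔ k ∈ acc := by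
    simp [pvCast]
  split_ifs with h1 h2 h2 <;> simp_all [pvCast]

lemma bridgeA (n : Nat) : ∀ (fuel x : Nat) (acc : List Nat),
    nearLoopA (n : Int) fuel (x : Int) (pvCast acc) = pvCast (natLoopA n fuel x acc) := by
  intro fuel
  induction fuel with
  | zero => intro x acc; rfl
  | succ fuel ih =>
    intro x acc
    rw [nearLoopA, natLoopA]
    simp only [PySem.Int.floordiv_natCast]
    by_cases h : 1 < n / x
    · rw [if_pos (by exact_mod_cast h), if_pos h]
      rw [bridge_add]
      have h2 : (((n / (n / x) : Nat) : Int) + 1) = (((n / (n / x) + 1 : Nat)) : Int) := by push_cast; ring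
      rw [h2]
      exact ih (n / (n / x) + 1) (natAdd acc (n / (n / x)))
    · rw [if_neg (by exact_mod_cast h), if_neg h]

lemma nearfactors_natCast (n : Nat) :
    nearfactors (n : Int) = pvCast (natA n) := by
  rw [nearfactors, natA]
  have h1 : ((n : Int).toNat + 2) = n + 2 := by simp
  have h2 : (PySem.Set.ofList [1] : List Int) = pvCast [1] := by decide
  rw [h1, h2]
  exact_mod_cast bridgeA n (n + 2) 2 [1]

lemma bridge_fold (f : Nat → Nat) : ∀ (xs acc : List Nat),
    xs.foldl (fun a x => PySem.Set.add a ((f x : Nat) : Int)) (pvCast acc) =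
      pvCast (xs.foldl (fun a x => natAdd a (f x)) acc) := by
  intro xs
  induction xs with
  | nil => intro acc; rfl
  | cons x xs ih =>
    intro acc
    simp only [List.foldl_cons]
    rw [bridge_add]
    exact ih (natAdd acc (f x))

lemma nearfactors_alt_natCast (n : Nat) :
    nearfactors_alt (n : Int) = pvCast (natB n) := by
  rw [nearfactors_alt, natB]
  simp only [Int.toNat_natCast]
  rw [if_pos (by positivity : (0:Int) ≤ (n:Int))]
  set s := Nat.sqrt n with hs
  have hr1 : PySem.List.pyRange 2 ((s : Int) + 1) 1 = pvCast (List.range' 2 (s - 1)) := by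
    apply List.ext_getElem
    · simp [PySem.List.length_pyRange_one, pvCast]; omega
    · intro k h1 h2
      simp [PySem.List.getElem_pyRange_one, List.getElem_range', pvCast]
  have hr2 : PySem.List.pyRange (s : Int) 1 (-1) = pvCast ((List.range' 2 (s - 1)).reverse) := by
    rw [PySem.List.pyRange_neg_one_eq_reverse, pvCast, List.map_reverse]
    congr 1
  rw [hr1, hr2]
  simp only [pvCast, List.foldl_map]
  have hinit : (PySem.Set.ofList [1] : List Int) = pvCast [1] := by decide
  rw [hinit]
  have hfold1 := bridge_fold (fun x => x) (List.range' 2 (s - 1)) [1]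
  rw [hfold1]
  have hfold2 := bridge_fold (fun x => n / x) ((List.range' 2 (s - 1)).reverse)
    ((List.range' 2 (s - 1)).foldl (fun a x => natAdd a x) [1])
  simp only [PySem.Int.floordiv_natCast]
  rw [hfold2]
  rfl

lemma neg_case (value : Int) (h : value < 0) :
    nearfactors value = [1] ∧ nearfactors_alt value = [1] := by
  constructor
  · rw [nearfactors]
    have hfuel : value.toNat + 2 = 2 := by omega
    rw [hfuel, nearLoopA]
    have h2 : PySem.Int.floordiv value 2 < 0 := by
      rw [PySem.Int.floordiv_eq_ediv_of_pos (by omega)]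
      omega
    rw [if_neg (by omega)]
    rfl
  · rw [nearfactors_alt]
    rw [if_neg (by omega)]
    rfl

-- ===== VERDICT (by name: the statement is the Claim_ definition above) =====
theorem nearfactors_spec : Claim_equal_nearfactors := by
  intro value _
  unfold Spec_nearfactors
  rcases Int.lt_or_le value 0 with h | h
  · obtain ⟨h1, h2⟩ := neg_case value h
    rw [h1, h2]
  · obtain ⟨n, rfl⟩ := Int.eq_ofNat_of_zero_le h
    rw [nearfactors_natCast, nearfactors_alt_natCast, natA_eq_natB]
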